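-- pv_equiv track=rewrite | github.com/rtmigo/svet | vien/_parsed_args.py | items_after
-- ===== SOURCE A (Python) =====
-- from typing import List, Optional, Iterable
--
-- def items_after(items: Iterable[str], x: str) -> Iterable[str]:
--     found = False
--     for arg in items:
--         if found:
--             yield arg
--         elif arg == x:
--             found = True
--     if not found:
--         raise LookupError
-- ===== SOURCE B (Python) =====
-- def items_after(items, x):
--     lst = list(items)
--     try:
--         i = lst.index(x)
--     except ValueError:
--         raise LookupError
--     return lst[i + 1:]
-- ===== Notes on version B (the rewrite author's own statement) =====
-- stated objective: idiomatic
-- what changed: Replaces A's flag-carrying generator loop with a materialize-then-slice implementation: list(items), list.index(x) to locate the first match, and a slice lst[i+1:] for the result; no per-element loop or flag remains.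
import Mathlib
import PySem

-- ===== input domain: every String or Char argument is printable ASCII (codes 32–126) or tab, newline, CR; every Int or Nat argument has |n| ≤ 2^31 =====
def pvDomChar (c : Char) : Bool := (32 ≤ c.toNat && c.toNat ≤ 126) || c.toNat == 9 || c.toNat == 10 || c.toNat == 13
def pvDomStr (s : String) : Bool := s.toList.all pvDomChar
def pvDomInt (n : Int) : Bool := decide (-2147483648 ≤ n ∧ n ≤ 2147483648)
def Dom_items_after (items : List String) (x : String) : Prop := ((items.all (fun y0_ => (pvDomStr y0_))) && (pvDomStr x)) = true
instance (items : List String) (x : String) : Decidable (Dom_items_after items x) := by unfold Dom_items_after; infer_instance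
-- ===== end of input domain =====

-- One honest line: B replaces A's flag-carrying element loop with list.index + a slice
-- lst[i+1:]; equivalence is about the sequence of yielded/returned items.

-- ===== PORT A =====
-- A's loop: carry the `found` flag through the list, collecting items once found.
def itemsAfterLoopA (found : Bool) (items : List String) (x : String) : List String :=
  match items with
  | [] => []
  | arg :: rest =>
    if found then arg :: itemsAfterLoopA found rest x
    else if arg == x then itemsAfterLoopA true rest x
    else itemsAfterLoopA false rest x

def items_after (items : List String) (x : String) : List String :=
  itemsAfterLoopA false items x

-- ===== PORT B =====
-- B: locate the first occurrence with list.index, then slice off everything after it.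
def items_after_alt (items : List String) (x : String) : List String :=
  match PySem.List.index? items x with
  | none => []  -- unreachable under Pre_ (Python B raises LookupError here)
  | some i => PySem.List.slice items (some ((i : Int) + 1)) none

-- ===== PRECONDITION & SPEC =====
-- Pre_ excludes inputs where x never occurs: there the Python A (and B) raises LookupError.
def Pre_items_after (items : List String) (x : String) : Prop := x ∈ items
instance (items : List String) (x : String) : Decidable (Pre_items_after items x) := by unfold Pre_items_after; infer_instance

def pvWitness_items_after : List String × String := (["a", "b", "c"], "b")

def Spec_items_after (items : List String) (x : String) (out : List String) : Prop := out = items_after_alt items x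
instance (items : List String) (x : String) (out : List String) : Decidable (Spec_items_after items x out) := by unfold Spec_items_after; infer_instance

-- ===== CLAIM =====
def Claim_equal_items_after : Prop := ∀ (items : List String) (x : String), Dom_items_after items x → Pre_items_after items x → Spec_items_after items x (items_after items x)

-- ===== LEMMAS AND PROOFS =====
theorem loopA_found_true (items : List String) (x : String) :
    itemsAfterLoopA true items x = items := by
  induction items with
  | nil => rfl
  | cons a rest ih => simp [itemsAfterLoopA, ih]

theorem loopA_false_eq_alt (items : List String) (x : String) :
    itemsAfterLoopA false items x = items_after_alt items x := by
  induction items with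
  | nil => rfl
  | cons a rest ih =>
    by_cases h : a = x
    · subst h
      rw [items_after_alt, PySem.List.index?_cons_self]
      simp only [Nat.cast_zero, zero_add]
      rw [show (1 : Int) = ((1 : Nat) : Int) by norm_num,
        PySem.List.slice_from_natCast]
      simp [itemsAfterLoopA, loopA_found_true]
    · rw [itemsAfterLoopA]
      simp only [if_neg Bool.false_ne_true, if_neg (show ¬((a == x) = true) by simpa using h)]
      rw [ih, items_after_alt, items_after_alt,
        PySem.List.index?_cons_of_ne rest h]
      cases hi : PySem.List.index? rest x with
      | none => simp
      | some i =>
        simp only [Option.map_some]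
        rw [show ((i : Int)) + 1 = ((i + 1 : Nat) : Int) by push_cast; ring,
          show (((i + 1 : Nat) : Int)) + 1 = ((i + 2 : Nat) : Int) by push_cast; ring,
          PySem.List.slice_from_natCast, PySem.List.slice_from_natCast]
        simp [List.drop_succ_cons]

-- ===== VERDICT =====
theorem items_after_spec : Claim_equal_items_after := by
  intro items x _ _
  unfold Spec_items_after items_after
  exact loopA_false_eq_alt items x
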